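-- pv_equiv track=rewrite | github.com/juyi212/Algorithm_study | programmers/호텔 방 배정.py | solution
-- ===== SOURCE A (Python) =====
-- def solution(k, room_number):
--     # input 값이 1조임
--     # 시간초과를 해결하기 위해서는 유니온파인드나 다른 방법들을 써야함
--
--     # 시간초과남
--     # rm = [False] * k
--     # answer = []
--     # for i in room_number:
--     #     if rm[i] == False:
--     #         answer.append(i)
--     #         rm[i] = True
--     #     else:
--     #         ch = i
--     #         while ch <= k:
--     #             ch += 1
--     #             if rm[ch] == False:
--     #                 answer.append(ch)
--     #                 rm[ch] = True
--     #                 break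
--     #
--     # return answer
--
--     def check(number, rooms):
--         if number not in rooms:
--             rooms[number] = number+1
--             return number
--         empty = check(rooms[number], rooms)
--         rooms[number] = empty+1
--         return empty
--
--     rooms = dict()
--     for num in room_number:
--         ch_room = check(num, rooms)
--     return list(rooms.keys())
-- ===== SOURCE B (Python) =====
-- def solution(k, room_number):
--     rooms = {}
--     answer = []
--     for num in room_number:
--         # walk the "next candidate" chain iteratively to the first empty room
--         x = num
--         path = []
--         while x in rooms:
--             path.append(x)
--             x = rooms[x]
--         for node in path:
--             rooms[node] = x + 1
--         rooms[x] = x + 1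
--         answer.append(x)
--     return answer
-- ===== Notes on version B (the rewrite author's own statement) =====
-- stated objective: alternative
-- what changed: The recursive check with dict-key-order output is replaced by an iterative chain walk that records the visited path in a list, compresses it in a loop, and appends each assigned room to an explicit answer list.
import Mathlib
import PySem

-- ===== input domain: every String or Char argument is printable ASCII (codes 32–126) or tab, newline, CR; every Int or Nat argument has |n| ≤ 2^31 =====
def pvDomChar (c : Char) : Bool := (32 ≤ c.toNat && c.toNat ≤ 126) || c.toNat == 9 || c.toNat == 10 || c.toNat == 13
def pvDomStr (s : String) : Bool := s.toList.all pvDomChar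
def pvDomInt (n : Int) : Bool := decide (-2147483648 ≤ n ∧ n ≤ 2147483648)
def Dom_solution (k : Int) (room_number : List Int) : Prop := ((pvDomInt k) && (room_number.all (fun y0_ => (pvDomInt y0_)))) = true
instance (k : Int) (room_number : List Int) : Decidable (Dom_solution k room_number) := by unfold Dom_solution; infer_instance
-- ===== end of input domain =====

-- B replaces A's recursive union-find `check` (output read off dict key order) by an
-- iterative chain walk with an explicit path list and an explicit answer list; same cost.

-- ===== PORT A =====
-- A's recursive check(number, rooms); the Nat argument is a fuel guard only (the chain of
-- dict values is strictly increasing through distinct keys, so fuel = size+1 is never exhausted).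
def checkA : Nat → Int → PySem.Dict Int Int → Int × PySem.Dict Int Int
  | 0, n, d => (n, d.insert n (n+1))
  | f+1, n, d =>
      match d.get? n with
      | none => (n, d.insert n (n+1))
      | some v =>
          let r := checkA f v d
          (r.1, r.2.insert n (r.1+1))

def solution (k : Int) (room_number : List Int) : List Int :=
  (room_number.foldl (fun d num => (checkA (d.size+1) num d).2) PySem.Dict.empty).keys

-- ===== PORT B =====
-- B's while-loop `while x in rooms: path.append(x); x = rooms[x]`; fuel guard as above.
def walkB : Nat → Int → PySem.Dict Int Int → List Int → Int × List Int
  | 0, x, _, path => (x, path)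
  | f+1, x, rooms, path =>
      match rooms.get? x with
      | some v => walkB f v rooms (path ++ [x])
      | none => (x, path)

-- B's find: walk to the empty room, then compress the path and occupy the empty room.
def findB (x : Int) (rooms : PySem.Dict Int Int) : Int × PySem.Dict Int Int :=
  let p := walkB (rooms.size+1) x rooms []
  let r := p.2.foldl (fun d n => d.insert n (p.1+1)) rooms
  (p.1, r.insert p.1 (p.1+1))

def solution_alt (k : Int) (room_number : List Int) : List Int :=
  (room_number.foldl (fun (st : PySem.Dict Int Int × List Int) num =>
      let r := findB num st.1
      (r.2, st.2 ++ [r.1])) (PySem.Dict.empty, [])).2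

-- ===== PRECONDITION & SPEC =====
def Spec_solution (k : Int) (room_number : List Int) (out : List Int) : Prop := out = solution_alt k room_number
instance (k : Int) (room_number : List Int) (out : List Int) : Decidable (Spec_solution k room_number out) := by unfold Spec_solution; infer_instance

-- ===== CLAIM (what is proved, stated in full; the proofs are below) =====
def Claim_equal_solution : Prop := ∀ (k : Int) (room_number : List Int), Dom_solution k room_number → Spec_solution k room_number (solution k room_number)

-- ===== LEMMAS AND PROOFS =====

-- walk with a non-empty accumulator
theorem walkB_acc (f : Nat) : ∀ (x : Int) (d : PySem.Dict Int Int) (acc : List Int),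
    walkB f x d acc = ((walkB f x d []).1, acc ++ (walkB f x d []).2) := by
  induction f with
  | zero => intro x d acc; simp [walkB]
  | succ f ih =>
      intro x d acc
      simp only [walkB]
      cases h : d.get? x with
      | none => simp
      | some v =>
          simp only []
          rw [ih v d (acc ++ [x]), ih v d ([] ++ [x])]
          simp

-- inserting the SAME value at two keys commutes when the first key is already present
theorem ins_comm (d : PySem.Dict Int Int) (a b v : Int) (ha : d.contains a = true) :
    (d.insert b v).insert a v = (d.insert a v).insert b v := by
  by_cases hab : a = b
  · subst hab; rfl
  · apply PySem.Dict.ext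
    by_cases hb : d.contains b = true
    · simp [PySem.Dict.items_insert, PySem.Dict.contains_insert, ha, hb]
      intro x y _
      by_cases hxb : x = b <;> by_cases hxa : x = a <;> simp_all
    · simp [PySem.Dict.items_insert, PySem.Dict.contains_insert, ha, hb]
      have hba : ¬ b = a := fun h => hab h.symm
      simp [hba]

theorem contains_foldl_ins (path : List Int) (d : PySem.Dict Int Int) (n v : Int)
    (h : d.contains n = true) :
    (path.foldl (fun d' m => d'.insert m v) d).contains n = true := by
  induction path generalizing d with
  | nil => exact h
  | cons p ps ih =>
      simp only [List.foldl_cons]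
      exact ih _ (by rw [PySem.Dict.contains_insert]; simp [h])

theorem foldl_ins_pull (path : List Int) (d : PySem.Dict Int Int) (n v : Int)
    (h : d.contains n = true) :
    path.foldl (fun d' m => d'.insert m v) (d.insert n v)
      = (path.foldl (fun d' m => d'.insert m v) d).insert n v := by
  induction path generalizing d with
  | nil => rfl
  | cons p ps ih =>
      simp only [List.foldl_cons]
      rw [← ins_comm d n p v h, ih _ (by rw [PySem.Dict.contains_insert]; simp [h])]

-- A's recursive check computes exactly B's walk + compression, at every fuel
theorem check_eq_walk (f : Nat) : ∀ (n : Int) (d : PySem.Dict Int Int),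
    checkA f n d = ((walkB f n d []).1,
      ((walkB f n d []).2.foldl (fun d' m => d'.insert m ((walkB f n d []).1+1)) d).insert
        (walkB f n d []).1 ((walkB f n d []).1+1)) := by
  induction f with
  | zero => intro n d; simp [checkA, walkB]
  | succ f ih =>
      intro n d
      simp only [checkA, walkB]
      cases h : d.get? n with
      | none => simp
      | some v =>
          simp only []
          rw [walkB_acc f v d ([] ++ [n])]
          have hc : d.contains n = true := by
            rw [PySem.Dict.contains_eq_isSome_get?, h]; rfl
          rw [ih v d]
          simp only [List.nil_append, List.cons_append, List.foldl_cons, List.nil_append]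
          rw [foldl_ins_pull _ d n _ hc,
              ← ins_comm _ n ((walkB f v d []).1) ((walkB f v d []).1 + 1)
                (contains_foldl_ins _ d n _ hc)]

theorem check_eq_find (n : Int) (d : PySem.Dict Int Int) :
    checkA (d.size+1) n d = findB n d := by
  rw [check_eq_walk]; rfl

-- the hotel invariant: every stored "next candidate" is strictly above its key
def InvD (d : PySem.Dict Int Int) : Prop := ∀ p ∈ d.items, p.1 < p.2

theorem walk_path_contains (f : Nat) : ∀ (x : Int) (d : PySem.Dict Int Int),
    ∀ m ∈ (walkB f x d []).2, d.contains m = true := by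
  induction f with
  | zero => intro x d m hm; simp [walkB] at hm
  | succ f ih =>
      intro x d m hm
      simp only [walkB] at hm
      cases h : d.get? x with
      | none => rw [h] at hm; simp at hm
      | some v =>
          rw [h] at hm
          simp only [] at hm
          rw [walkB_acc f v d ([] ++ [x])] at hm
          simp only [List.nil_append] at hm
          rcases List.mem_append.mp hm with h1 | h2
          · have : m = x := by simpa using h1
            subst this
            rw [PySem.Dict.contains_eq_isSome_get?, h]; rfl
          · exact ih v d m h2

theorem walk_le (f : Nat) : ∀ (x : Int) (d : PySem.Dict Int Int), InvD d →
    x ≤ (walkB f x d []).1 := by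
  induction f with
  | zero => intro x d _; simp [walkB]
  | succ f ih =>
      intro x d hI
      simp only [walkB]
      cases h : d.get? x with
      | none => simp
      | some v =>
          simp only []
          rw [walkB_acc f v d ([] ++ [x])]
          have hxv : x < v := hI (x, v) ((PySem.Dict.mem_items_of_get?_eq_some d h))
          exact le_of_lt (lt_of_lt_of_le hxv (ih v d hI))

theorem walk_path_lt (f : Nat) : ∀ (x : Int) (d : PySem.Dict Int Int), InvD d →
    ∀ m ∈ (walkB f x d []).2, m < (walkB f x d []).1 := by
  induction f with
  | zero => intro x d _ m hm; simp [walkB] at hm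
  | succ f ih =>
      intro x d hI m hm
      simp only [walkB] at hm ⊢
      cases h : d.get? x with
      | none => rw [h] at hm; simp at hm
      | some v =>
          rw [h] at hm
          simp only [] at hm ⊢
          rw [walkB_acc f v d ([] ++ [x])] at hm ⊢
          simp only [List.nil_append] at hm ⊢
          have hxv : x < v := hI (x, v) ((PySem.Dict.mem_items_of_get?_eq_some d h))
          rcases List.mem_append.mp hm with h1 | h2
          · have : m = x := by simpa using h1
            subst this
            exact lt_of_lt_of_le hxv (walk_le f v d hI)
          · exact ih v d hI m h2

-- with enough fuel the walk really ends at an empty room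
theorem walk_fresh (f : Nat) : ∀ (x : Int) (d : PySem.Dict Int Int), InvD d →
    (d.items.filter (fun p => decide (x ≤ p.1))).length < f →
    d.get? (walkB f x d []).1 = none := by
  induction f with
  | zero => intro x d _ hlen; omega
  | succ f ih =>
      intro x d hI hlen
      simp only [walkB]
      cases h : d.get? x with
      | none => simpa using h
      | some v =>
          simp only []
          rw [walkB_acc f v d ([] ++ [x])]
          have hmem : (x, v) ∈ d.items := PySem.Dict.mem_items_of_get?_eq_some d h
          have hxv : x < v := hI (x, v) hmem
          apply ih v d hI
          have hsub : (d.items.filter (fun p => decide (v ≤ p.1))).Sublist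
              (d.items.filter (fun p => decide (x ≤ p.1))) := by
            have heq : d.items.filter (fun p => decide (v ≤ p.1))
                = (d.items.filter (fun p => decide (x ≤ p.1))).filter (fun p => decide (v ≤ p.1)) := by
              rw [List.filter_filter]
              apply List.filter_congr
              intro p _
              by_cases hv : v ≤ p.1
              · simp [hv, le_trans (le_of_lt hxv) hv]
              · simp [hv]
            rw [heq]; exact List.filter_sublist
          have hne : d.items.filter (fun p => decide (v ≤ p.1))
              ≠ d.items.filter (fun p => decide (x ≤ p.1)) := by
            intro heq
            have h1 : (x, v) ∈ d.items.filter (fun p => decide (x ≤ p.1)) := by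
              simp [List.mem_filter, hmem]
            rw [← heq] at h1
            have h2 := (List.mem_filter.mp h1).2
            simp at h2
            omega
          have hlt := lt_of_le_of_ne hsub.length_le (fun hl => hne (hsub.eq_of_length hl))
          omega

theorem findB_fresh (n : Int) (d : PySem.Dict Int Int) (hI : InvD d) :
    d.get? (findB n d).1 = none := by
  have hlen : (d.items.filter (fun p => decide (n ≤ p.1))).length < d.size + 1 := by
    have := List.length_filter_le (fun p => decide (n ≤ p.1)) d.items
    simp only [PySem.Dict.size]
    omega
  simpa [findB] using walk_fresh (d.size+1) n d hI hlen

theorem keys_findB (n : Int) (d : PySem.Dict Int Int) (hI : InvD d) :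
    (findB n d).2.keys = d.keys ++ [(findB n d).1] := by
  have hfresh := findB_fresh n d hI
  have hpc := walk_path_contains (d.size+1) n d
  simp only [findB] at hfresh ⊢
  have hfil : List.filter (fun y => !PySem.Set.contains d.keys y)
      (PySem.Set.ofList (walkB (d.size+1) n d []).2) = [] := by
    rw [List.filter_eq_nil_iff]
    intro y hy
    have hy' : y ∈ (walkB (d.size+1) n d []).2 := by
      simpa [PySem.Set.mem_ofList] using hy
    have hcy := hpc y hy'
    rw [PySem.Dict.contains_iff_mem_keys] at hcy
    simp [PySem.Set.contains, hcy]
  have hkr : ((walkB (d.size+1) n d []).2.foldl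
      (fun d' m => d'.insert m ((walkB (d.size+1) n d []).1+1)) d).keys = d.keys := by
    rw [PySem.Dict.keys_foldl_insert, PySem.Set.update_eq_append_filter, hfil, List.append_nil]
  have hnm : (walkB (d.size+1) n d []).1 ∉ d.keys := by
    rw [← PySem.Dict.get?_eq_none_iff_not_mem_keys]; exact hfresh
  have hcr : ((walkB (d.size+1) n d []).2.foldl
      (fun d' m => d'.insert m ((walkB (d.size+1) n d []).1+1)) d).contains
        ((walkB (d.size+1) n d []).1) = false := by
    cases hb : ((walkB (d.size+1) n d []).2.foldl
      (fun d' m => d'.insert m ((walkB (d.size+1) n d []).1+1)) d).contains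
        ((walkB (d.size+1) n d []).1) with
    | false => rfl
    | true => exact absurd (hkr ▸ (PySem.Dict.contains_iff_mem_keys _ _).mp hb) hnm
  rw [PySem.Dict.keys_insert_of_not_contains _ _ hcr, hkr]

theorem inv_foldl_ins (path : List Int) : ∀ (d : PySem.Dict Int Int) (v : Int), InvD d →
    (∀ m ∈ path, m < v) → InvD (path.foldl (fun d' m => d'.insert m v) d) := by
  induction path with
  | nil => intro d v hI _; exact hI
  | cons p ps ih =>
      intro d v hI hlt
      simp only [List.foldl_cons]
      refine ih _ v ?_ (fun m hm => hlt m (List.mem_cons_of_mem _ hm))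
      intro q hq
      rcases (PySem.Dict.mem_items_insert _ _ _ _).mp hq with h1 | h2
      · subst h1; exact hlt p (List.mem_cons_self ..)
      · exact hI q h2.1

theorem inv_findB (n : Int) (d : PySem.Dict Int Int) (hI : InvD d) : InvD (findB n d).2 := by
  have hlt := walk_path_lt (d.size+1) n d hI
  simp only [findB]
  intro q hq
  rcases (PySem.Dict.mem_items_insert _ _ _ _).mp hq with h1 | h2
  · subst h1; omega
  · have h3 := inv_foldl_ins (walkB (d.size+1) n d []).2 d ((walkB (d.size+1) n d []).1 + 1)
        hI (fun m hm => by have := hlt m hm; omega) q h2.1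
    exact h3

-- the main loop invariant: same dict on both sides, and B's answer list is A's key list
theorem main_fold (l : List Int) : ∀ (d : PySem.Dict Int Int) (ans : List Int),
    InvD d → d.keys = ans →
    (l.foldl (fun d num => (checkA (d.size+1) num d).2) d)
        = (l.foldl (fun (st : PySem.Dict Int Int × List Int) num =>
            let r := findB num st.1
            (r.2, st.2 ++ [r.1])) (d, ans)).1
      ∧ (l.foldl (fun (st : PySem.Dict Int Int × List Int) num =>
            let r := findB num st.1
            (r.2, st.2 ++ [r.1])) (d, ans)).2
        = (l.foldl (fun d num => (checkA (d.size+1) num d).2) d).keys := by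
  induction l with
  | nil => intro d ans _ hkeys; exact ⟨rfl, hkeys.symm⟩
  | cons num t ih =>
      intro d ans hI hkeys
      simp only [List.foldl_cons]
      rw [check_eq_find]
      exact ih (findB num d).2 (ans ++ [(findB num d).1]) (inv_findB num d hI)
        (by rw [keys_findB num d hI, hkeys])

-- ===== VERDICT (by name: the statement is the Claim_ definition above) =====
theorem solution_spec : Claim_equal_solution := by
  intro k room_number _
  unfold Spec_solution solution solution_alt
  have h := main_fold room_number PySem.Dict.empty [] (by intro p hp; simp [PySem.Dict.empty] at hp)
    (by simp [PySem.Dict.empty, PySem.Dict.keys])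
  exact h.2.symm
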